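-- pv_equiv track=rewrite | github.com/roger-creus/glyphbench | scripts/play_curses.py | _parse_obs
-- ===== SOURCE A (Python) =====
-- def _parse_obs(obs: str) -> dict[str, str]:
--     """Parse a rendered observation into sections."""
--     sections: dict[str, str] = {}
--     current_key = ""
--     current_lines: list[str] = []
--
--     for line in obs.split("\n"):
--         if line.startswith("[") and line.endswith("]"):
--             if current_key:
--                 sections[current_key] = "\n".join(current_lines)
--             current_key = line[1:-1]
--             current_lines = []
--         else:
--             current_lines.append(line)
--
--     if current_key:
--         sections[current_key] = "\n".join(current_lines)
--     return sections
-- ===== SOURCE B (Python) =====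
-- def _is_header(line: str) -> bool:
--     return line.startswith("[") and line.endswith("]")
--
--
-- def _body(lines: list) -> list:
--     """Lines up to (not including) the next header line."""
--     body = []
--     for line in lines:
--         if _is_header(line):
--             break
--         body.append(line)
--     return body
--
--
-- def _skip_to_header(lines: list) -> list:
--     """Drop leading non-header lines."""
--     i = 0
--     while i < len(lines) and not _is_header(lines[i]):
--         i += 1
--     return lines[i:]
--
--
-- def _parse_obs(obs: str) -> dict[str, str]:
--     """Parse a rendered observation into sections."""
--     sections: dict[str, str] = {}
--     rest = _skip_to_header(obs.split("\n"))
--     while rest: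
--         header, tail = rest[0], rest[1:]
--         body = _body(tail)
--         rest = tail[len(body):]
--         key = header[1:-1]
--         if key:
--             sections[key] = "\n".join(body)
--     return sections
-- ===== Notes on version B (the rewrite author's own statement) =====
-- stated objective: simpler
-- what changed: A scans line-by-line with a (current_key, current_lines) accumulator flushed at each header and at the end; B first skips to the first header, then consumes one whole section per loop iteration (header plus the block of lines below it) with no carried flush state.
import Mathlib
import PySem

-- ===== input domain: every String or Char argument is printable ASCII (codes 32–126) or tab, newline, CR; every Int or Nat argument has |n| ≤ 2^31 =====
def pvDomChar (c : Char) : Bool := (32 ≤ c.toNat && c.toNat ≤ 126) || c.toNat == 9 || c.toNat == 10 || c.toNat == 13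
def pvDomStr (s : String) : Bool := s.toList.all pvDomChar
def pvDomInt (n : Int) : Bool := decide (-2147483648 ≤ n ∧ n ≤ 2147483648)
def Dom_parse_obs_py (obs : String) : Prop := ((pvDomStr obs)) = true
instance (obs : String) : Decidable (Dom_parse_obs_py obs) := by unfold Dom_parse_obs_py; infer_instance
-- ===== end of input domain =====

-- B replaces A's line-at-a-time fold carrying (current_key, current_lines) by a
-- section-at-a-time decomposition: skip to the first header, then repeatedly take
-- one header and the block of lines below it (simpler decomposition, same cost).

-- ===== PORT A =====
-- the final 'if current_key: sections[current_key] = ...' flush (also performed at each header)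
def pvFinish (st : PySem.Dict String String × String × List String) : PySem.Dict String String :=
  if st.2.1 ≠ "" then st.1.insert st.2.1 (PySem.Str.join "\n" st.2.2) else st.1

def pvStepA (st : PySem.Dict String String × String × List String) (line : String) :
    PySem.Dict String String × String × List String :=
  if PySem.Str.startswith line "[" && PySem.Str.endswith line "]" then
    (if st.2.1 ≠ "" then st.1.insert st.2.1 (PySem.Str.join "\n" st.2.2) else st.1,
     PySem.Str.slice line (some 1) (some (-1)), [])
  else
    (st.1, st.2.1, st.2.2 ++ [line])

def parse_obs_py (obs : String) : List (String × String) :=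
  (pvFinish (((PySem.Str.split? obs "\n").getD []).foldl pvStepA (PySem.Dict.empty, "", []))).items

-- ===== PORT B =====
def pvIsHeader (line : String) : Bool :=
  PySem.Str.startswith line "[" && PySem.Str.endswith line "]"

-- _body: lines up to (not including) the next header line
def pvBody : List String → List String
  | [] => []
  | l :: t => if pvIsHeader l then [] else l :: pvBody t

-- _skip_to_header: drop leading non-header lines
def pvSkip : List String → List String
  | [] => []
  | l :: t => if pvIsHeader l then l :: t else pvSkip t

-- the while loop of B: rest starts with a header line (or is empty)
def pvGo : List String → PySem.Dict String String → PySem.Dict String String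
  | [], sections => sections
  | header :: tail, sections =>
    let body := pvBody tail
    let rest := tail.drop body.length
    let key := PySem.Str.slice header (some 1) (some (-1))
    pvGo rest (if key ≠ "" then sections.insert key (PySem.Str.join "\n" body) else sections)
  termination_by rest _ => rest.length
  decreasing_by simp [List.length_drop]

def parse_obs_py_alt (obs : String) : List (String × String) :=
  (pvGo (pvSkip ((PySem.Str.split? obs "\n").getD [])) PySem.Dict.empty).items

-- ===== PRECONDITION & SPEC =====
def Spec_parse_obs_py (obs : String) (out : List (String × String)) : Prop := out = parse_obs_py_alt obs
instance (obs : String) (out : List (String × String)) : Decidable (Spec_parse_obs_py obs out) := by unfold Spec_parse_obs_py; infer_instance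

-- ===== CLAIM (what is proved, stated in full; the proofs are below) =====
def Claim_equal_parse_obs_py : Prop := ∀ (obs : String), Dom_parse_obs_py obs → Spec_parse_obs_py obs (parse_obs_py obs)

-- ===== LEMMAS AND PROOFS =====

-- conditional insert, as A's flush and B's loop both perform it
def pvUpd (d : PySem.Dict String String) (k v : String) : PySem.Dict String String :=
  if k ≠ "" then d.insert k v else d

lemma pvSkip_eq_drop (t : List String) : pvSkip t = t.drop (pvBody t).length := by
  induction t with
  | nil => rfl
  | cons l t ih =>
    by_cases h : pvIsHeader l = true
    · simp [pvSkip, pvBody, h]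
    · simp [pvSkip, pvBody, h, ih]

-- the main invariant: A's fold from state (d, k, acc) over t, then flushed,
-- equals B's loop on the remaining headers with k's section closed by pvBody t.
lemma pvStepA_eq (st : PySem.Dict String String × String × List String) (l : String) :
    pvStepA st l =
      if pvIsHeader l then
        (pvUpd st.1 st.2.1 (PySem.Str.join "\n" st.2.2), PySem.Str.slice l (some 1) (some (-1)), [])
      else (st.1, st.2.1, st.2.2 ++ [l]) := rfl

lemma pvMain (t : List String) (d : PySem.Dict String String) (k : String) (acc : List String) :
    pvFinish (t.foldl pvStepA (d, k, acc))
    = pvGo (pvSkip t) (pvUpd d k (PySem.Str.join "\n" (acc ++ pvBody t))) := by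
  induction t generalizing d k acc with
  | nil => simp [pvSkip, pvBody, pvGo, pvUpd, pvFinish]
  | cons l t ih =>
    by_cases h : pvIsHeader l = true
    · simp only [List.foldl_cons, pvStepA_eq, h, if_pos]
      rw [ih]
      have hb : pvBody (l :: t) = [] := by simp [pvBody, h]
      have hs : pvSkip (l :: t) = l :: t := by simp [pvSkip, h]
      rw [hb, hs, pvGo]
      rw [← pvSkip_eq_drop]
      simp [pvUpd]
    · simp only [List.foldl_cons, pvStepA_eq, h, if_neg, Bool.false_eq_true, not_false_iff]
      rw [ih]
      have hb : pvBody (l :: t) = l :: pvBody t := by simp [pvBody, h]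
      have hs : pvSkip (l :: t) = pvSkip t := by simp [pvSkip, h]
      rw [hb, hs]
      simp

-- ===== VERDICT (by name: the statement is the Claim_ definition above) =====
theorem parse_obs_py_spec : Claim_equal_parse_obs_py := by
  intro obs _
  unfold Spec_parse_obs_py parse_obs_py parse_obs_py_alt
  rw [pvMain ((PySem.Str.split? obs "\n").getD []) PySem.Dict.empty "" []]
  simp [pvUpd]
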